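-- pv_equiv track=rewrite | github.com/arleilps/group-testing | partition.py | diff_sorted
-- ===== SOURCE A (Python) =====
-- def diff_sorted(group_inf, v_inf):
--     '''
--         Returns the difference between
-- 	group_inf and v_inf, which
-- 	are lists of infection events
-- 	that are assumed to be sorted.
--     '''
--     union = []
--     diff = []
--
--     i = 0
--     j = 0
--
--     while i < len(group_inf) and j < len(v_inf):
--         if group_inf[i][0] < v_inf[j][0]:
--             if group_inf[i][1] > 0:
--                 diff.append(group_inf[i])
--             i = i + 1
--         elif v_inf[j][0] < group_inf[i][0]:
--             j = j + 1
--
--         else: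
--             if group_inf[i][1] > 1:
--                 diff.append((group_inf[i][0],group_inf[i][1]-1))
--             i = i + 1
--             j = j + 1
--
--     while i < len(group_inf):
--         if group_inf[i][1] > 0:
--             diff.append(group_inf[i])
--         i = i + 1
--
--     return diff
-- ===== SOURCE B (Python) =====
-- def diff_sorted(group_inf, v_inf):
--     # Different data structure: count each key of v_inf in a dict once, then a
--     # single pass over group_inf consumes one credit per matching key.
--     credits = {}
--     for q in v_inf:
--         credits[q[0]] = credits.get(q[0], 0) + 1
--     diff = []
--     for p in group_inf:
--         if credits.get(p[0], 0) > 0: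
--             credits[p[0]] = credits.get(p[0], 0) - 1
--             if p[1] > 1:
--                 diff.append((p[0], p[1] - 1))
--         elif p[1] > 0:
--             diff.append(p)
--     return diff
-- ===== Notes on version B (the rewrite author's own statement) =====
-- stated objective: alternative
-- what changed: Replaces the two-pointer sorted merge (with its separate drain loop) by a dict of per-key occurrence counts of v_inf built once, then a single pass over group_inf that consumes one credit per matching key.
-- outside the precondition, e.g. on diff_sorted([(2, 1)], [(3, 1), (2, 1)]): A returns [(2, 1)], B returns []
import Mathlib
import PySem

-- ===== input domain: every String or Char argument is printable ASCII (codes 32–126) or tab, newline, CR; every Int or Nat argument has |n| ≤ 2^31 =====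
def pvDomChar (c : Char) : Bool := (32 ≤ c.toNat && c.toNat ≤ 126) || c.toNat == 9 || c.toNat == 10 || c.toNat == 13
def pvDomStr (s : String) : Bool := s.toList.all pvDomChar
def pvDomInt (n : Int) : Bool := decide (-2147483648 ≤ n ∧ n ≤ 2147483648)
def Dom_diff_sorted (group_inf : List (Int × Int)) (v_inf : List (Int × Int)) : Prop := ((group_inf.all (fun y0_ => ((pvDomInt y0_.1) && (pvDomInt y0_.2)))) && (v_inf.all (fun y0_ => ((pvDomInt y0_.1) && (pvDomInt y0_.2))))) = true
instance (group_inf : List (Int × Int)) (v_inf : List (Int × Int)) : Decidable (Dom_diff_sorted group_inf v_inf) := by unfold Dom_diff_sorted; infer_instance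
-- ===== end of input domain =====

-- B replaces A's two-pointer merge by a dict of per-key occurrence counts of v_inf built
-- once, then one pass over group_inf consuming one credit per matching key (alternative
-- data structure, same cost); equivalence is proved on key-sorted inputs (Pre_).

-- ===== PORT A =====
-- trailing while-loop of A: append remaining group elements with count > 0
def diffA_tail : List (Int × Int) → List (Int × Int)
  | [] => []
  | p :: rest => if p.2 > 0 then p :: diffA_tail rest else diffA_tail rest

-- main while-loop of A; indices i, j only advance, so the two suffixes are the state
def diffA_loop : List (Int × Int) → List (Int × Int) → List (Int × Int)
  | g, [] => diffA_tail g
  | [], _ :: _ => []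
  | p :: g', q :: v' =>
    if p.1 < q.1 then
      (if p.2 > 0 then p :: diffA_loop g' (q :: v') else diffA_loop g' (q :: v'))
    else if q.1 < p.1 then diffA_loop (p :: g') v'
    else (if p.2 > 1 then (p.1, p.2 - 1) :: diffA_loop g' v' else diffA_loop g' v')
termination_by g v => g.length + v.length

def diff_sorted (group_inf : List (Int × Int)) (v_inf : List (Int × Int)) : List (Int × Int) :=
  diffA_loop group_inf v_inf

-- ===== PORT B =====
-- first loop of Source B: credits[q[0]] = credits.get(q[0], 0) + 1
def buildCredits (v_inf : List (Int × Int)) : PySem.Dict Int Int :=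
  v_inf.foldl (fun d q => d.insert q.1 (d.getD q.1 0 + 1)) PySem.Dict.empty

-- second loop of Source B over group_inf, the credits dict as accumulator state
def bLoop : List (Int × Int) → PySem.Dict Int Int → List (Int × Int)
  | [], _ => []
  | p :: g, d =>
    if d.getD p.1 0 > 0 then
      (if p.2 > 1 then (p.1, p.2 - 1) :: bLoop g (d.insert p.1 (d.getD p.1 0 - 1))
       else bLoop g (d.insert p.1 (d.getD p.1 0 - 1)))
    else (if p.2 > 0 then p :: bLoop g d else bLoop g d)

def diff_sorted_alt (group_inf : List (Int × Int)) (v_inf : List (Int × Int)) : List (Int × Int) :=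
  bLoop group_inf (buildCredits v_inf)

-- ===== PRECONDITION & SPEC =====
-- Pre_ excludes inputs that are unsorted AND share a key between the two lists: such
-- inputs violate the function's documented assumption ("lists of infection events that
-- are assumed to be sorted"), and A's pairing of equal keys there is an accident of the
-- two-pointer traversal.  (With disjoint key sets the equal branch never fires, so the
-- equivalence holds regardless of order and such inputs stay inside Pre_.)
def Pre_diff_sorted (group_inf : List (Int × Int)) (v_inf : List (Int × Int)) : Prop :=
  (group_inf.Pairwise (fun p q => p.1 ≤ q.1) ∧ v_inf.Pairwise (fun p q => p.1 ≤ q.1)) ∨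
  (∀ p ∈ group_inf, p.1 ∉ v_inf.map (·.1))
instance (group_inf : List (Int × Int)) (v_inf : List (Int × Int)) : Decidable (Pre_diff_sorted group_inf v_inf) := by unfold Pre_diff_sorted; infer_instance

def pvWitness_diff_sorted : (List (Int × Int)) × (List (Int × Int)) :=
  ([(1, 2), (3, 1)], [(1, 1), (2, 1)])

def Spec_diff_sorted (group_inf : List (Int × Int)) (v_inf : List (Int × Int)) (out : List (Int × Int)) : Prop := out = diff_sorted_alt group_inf v_inf
instance (group_inf : List (Int × Int)) (v_inf : List (Int × Int)) (out : List (Int × Int)) : Decidable (Spec_diff_sorted group_inf v_inf out) := by unfold Spec_diff_sorted; infer_instance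

-- ===== CLAIM =====
def Claim_equal_diff_sorted : Prop := ∀ (group_inf : List (Int × Int)) (v_inf : List (Int × Int)), Dom_diff_sorted group_inf v_inf → Pre_diff_sorted group_inf v_inf → Spec_diff_sorted group_inf v_inf (diff_sorted group_inf v_inf)

-- ===== LEMMAS AND PROOFS =====

-- the credits dict built by Source B's first loop holds the key-occurrence counts of v_inf
theorem getD_buildCredits (v : List (Int × Int)) (k : Int) :
    (buildCredits v).getD k 0 = ((v.map (·.1)).count k : Int) := by
  have h := PySem.Dict.getD_foldl_insert_add_one (l := v.map (·.1))
    (d := (PySem.Dict.empty : PySem.Dict Int Int)) (v := k)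
  rw [List.foldl_map] at h
  unfold buildCredits
  simpa using h

-- main invariant: A's merge equals B's credit pass whenever the dict agrees with the
-- occurrence counts of the remaining v-suffix on every key still present in g
theorem merge_eq_credit (g v : List (Int × Int)) (d : PySem.Dict Int Int)
    (hg : g.Pairwise (fun p q => p.1 ≤ q.1)) (hv : v.Pairwise (fun p q => p.1 ≤ q.1))
    (hinv : ∀ p ∈ g, d.getD p.1 0 = ((v.map (·.1)).count p.1 : Int)) :
    diffA_loop g v = bLoop g d := by
  match g, v with
  | [], [] => simp [diffA_loop, diffA_tail, bLoop]
  | [], _ :: _ => simp [diffA_loop, bLoop]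
  | p :: g', [] =>
    have h0 : d.getD p.1 0 = 0 := by simpa using hinv p (by simp)
    have htail : diffA_loop g' [] = diffA_tail g' := by simp [diffA_loop]
    have ih := merge_eq_credit g' [] d (hg.sublist (by simp)) hv
      (fun r hr => hinv r (by simp [hr]))
    have ih' : diffA_tail g' = bLoop g' d := by rw [← htail]; exact ih
    simp [diffA_loop, diffA_tail, bLoop, h0, ih']
  | p :: g', q :: v' =>
    have hcnt : d.getD p.1 0 = (((q :: v').map (·.1)).count p.1 : Int) :=
      hinv p (by simp)
    have hg' : g'.Pairwise (fun p q => p.1 ≤ q.1) := hg.sublist (by simp)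
    have hv' : v'.Pairwise (fun p q => p.1 ≤ q.1) := hv.sublist (by simp)
    have hgmem : ∀ r ∈ g', p.1 ≤ r.1 := fun r hr => List.rel_of_pairwise_cons hg hr
    have hvmem : ∀ r ∈ v', q.1 ≤ r.1 := fun r hr => List.rel_of_pairwise_cons hv hr
    by_cases hlt : p.1 < q.1
    · -- p.1 smaller than every key of v: count is 0, both append-if-positive and drop p
      have hnot : p.1 ∉ (q :: v').map (·.1) := by
        simp only [List.mem_map]
        rintro ⟨r, hmem, hrk⟩
        rcases List.mem_cons.mp hmem with rfl | hr
        · omega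
        · have := hvmem r hr; omega
      have h0 : d.getD p.1 0 = 0 := by
        rw [hcnt, List.count_eq_zero.mpr hnot]; rfl
      have ih := merge_eq_credit g' (q :: v') d hg' hv
        (fun r hr => hinv r (by simp [hr]))
      simp only [diffA_loop, if_pos hlt, bLoop, h0, ih]
      simp
    · by_cases hgt : q.1 < p.1
      · -- head of v smaller than every remaining g key: A skips it, B's counts ignore it
        have ih := merge_eq_credit (p :: g') v' d hg hv'
          (by
            intro r hr
            have hrge : p.1 ≤ r.1 := by
              rcases List.mem_cons.mp hr with rfl | h
              · exact le_refl _
              · exact hgmem r h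
            have hc2 : ¬ (q.1 = r.1) := by omega
            have hthis := hinv r hr
            simp [hc2] at hthis
            omega)
        simp only [diffA_loop, if_neg hlt, if_pos hgt, ih]
      · -- equal keys: B has a credit (the head of v), consumes it
        have hk : q.1 = p.1 := by omega
        have hmem : p.1 ∈ (q :: v').map (·.1) := by
          simp only [List.mem_map]; exact ⟨q, by simp, hk⟩
        have hpos : d.getD p.1 0 > 0 := by
          rw [hcnt]
          exact_mod_cast List.count_pos_iff.mpr hmem
        have ih := merge_eq_credit g' v' (d.insert p.1 (d.getD p.1 0 - 1)) hg' hv'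
          (by
            intro r hr
            rw [PySem.Dict.getD_insert]
            by_cases hre : r.1 = p.1
            · rw [if_pos hre, hcnt, hre]
              simp only [List.map_cons, List.count_cons, hk, beq_self_eq_true, if_true,
                Nat.cast_add, Nat.cast_one]
              omega
            · rw [if_neg hre]
              have hc2 : ¬ (q.1 = r.1) := by omega
              have hthis := hinv r (by simp [hr])
              simp [hc2] at hthis
              omega)
        simp only [diffA_loop, if_neg hlt, if_neg hgt, bLoop, if_pos hpos, ih]
termination_by g.length + v.length

-- with disjoint key sets the equal branch of A and the credit branch of B never fire:
-- both return group_inf filtered by count > 0, in order, whatever the order of the lists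
theorem merge_eq_credit_disjoint (g v : List (Int × Int)) (d : PySem.Dict Int Int)
    (hinv : ∀ p ∈ g, d.getD p.1 0 = 0 ∧ p.1 ∉ v.map (·.1)) :
    diffA_loop g v = bLoop g d := by
  match g, v with
  | [], [] => simp [diffA_loop, diffA_tail, bLoop]
  | [], _ :: _ => simp [diffA_loop, bLoop]
  | p :: g', [] =>
    have h0 : d.getD p.1 0 = 0 := (hinv p (by simp)).1
    have htail : diffA_loop g' [] = diffA_tail g' := by simp [diffA_loop]
    have ih := merge_eq_credit_disjoint g' [] d (fun r hr => hinv r (by simp [hr]))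
    have ih' : diffA_tail g' = bLoop g' d := by rw [← htail]; exact ih
    simp [diffA_loop, diffA_tail, bLoop, h0, ih']
  | p :: g', q :: v' =>
    obtain ⟨h0, hnm⟩ := hinv p (by simp)
    have hne : p.1 ≠ q.1 := by
      intro h; exact hnm (by simp only [List.mem_map]; exact ⟨q, by simp, h.symm⟩)
    by_cases hlt : p.1 < q.1
    · have ih := merge_eq_credit_disjoint g' (q :: v') d
        (fun r hr => hinv r (by simp [hr]))
      simp only [diffA_loop, if_pos hlt, bLoop, h0, ih]
      simp
    · have hgt : q.1 < p.1 := by omega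
      have ih := merge_eq_credit_disjoint (p :: g') v' d
        (by
          intro r hr
          obtain ⟨h1, h2⟩ := hinv r hr
          exact ⟨h1, fun hm => h2 (by simp only [List.map_cons, List.mem_cons]; right; exact hm)⟩)
      simp only [diffA_loop, if_neg hlt, if_pos hgt, ih]
termination_by g.length + v.length

-- ===== VERDICT =====
theorem diff_sorted_spec : Claim_equal_diff_sorted := by
  intro g v _ hpre
  unfold Spec_diff_sorted diff_sorted diff_sorted_alt
  rcases hpre with ⟨hg, hv⟩ | hdisj
  · exact merge_eq_credit g v (buildCredits v) hg hv (fun p _ => getD_buildCredits v p.1)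
  · refine merge_eq_credit_disjoint g v (buildCredits v) (fun p hp => ⟨?_, hdisj p hp⟩)
    rw [getD_buildCredits]
    exact_mod_cast List.count_eq_zero.mpr (hdisj p hp)
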